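-- pv_equiv track=rewrite | github.com/desin80/B3AT | server/app/utils.py | normalize_to_smart_sig
-- ===== SOURCE A (Python) =====
-- def normalize_to_smart_sig(sig_str: str) -> str:
--     if not sig_str:
--         return ""
--
--     parts = [x.strip() for x in sig_str.split(",") if x.strip()]
--
--     strikers = []
--     specials = []
--
--     for pid in parts:
--         if pid.startswith("2"):
--             specials.append(pid)
--         else:
--             strikers.append(pid)
--     specials.sort(key=lambda x: int(x) if x.isdigit() else x)
--     final_list = strikers + specials
--     return ",".join(final_list)
-- ===== SOURCE B (Python) =====
-- def normalize_to_smart_sig(sig_str: str) -> str: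
--     if not sig_str:
--         return ""
--
--     parts = [x.strip() for x in sig_str.split(",") if x.strip()]
--
--     def key(p):
--         if p.startswith("2"):
--             return (1, int(p) if p.isdigit() else p)
--         return (0, 0)
--
--     return ",".join(sorted(parts, key=key))
-- ===== Notes on version B (the rewrite author's own statement) =====
-- stated objective: alternative
-- what changed: Replaces A's partition into strikers/specials lists, separate specials sort, and list concatenation by a single stable keyed sort of all cleaned parts with a composite key ((0,0) for non-'2' parts, (1, int-or-str) for '2'-prefixed parts); stability keeps strikers in input order ahead of the sorted specials.
import Mathlib
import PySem

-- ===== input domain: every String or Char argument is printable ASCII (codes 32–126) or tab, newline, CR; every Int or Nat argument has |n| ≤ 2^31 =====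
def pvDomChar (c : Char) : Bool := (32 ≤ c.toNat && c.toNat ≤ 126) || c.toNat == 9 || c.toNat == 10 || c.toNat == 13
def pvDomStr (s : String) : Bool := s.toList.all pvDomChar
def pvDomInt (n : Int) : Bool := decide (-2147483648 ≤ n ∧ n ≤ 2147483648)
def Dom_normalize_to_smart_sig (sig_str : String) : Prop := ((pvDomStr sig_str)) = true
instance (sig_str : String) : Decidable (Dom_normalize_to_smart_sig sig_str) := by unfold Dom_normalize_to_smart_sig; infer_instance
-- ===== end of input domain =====

-- B replaces A's partition-into-two-lists + separate specials sort + concatenation by ONE stable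
-- keyed sort of all parts with a composite key ((0,0) for non-'2' parts, (1, int-or-str) for '2' parts).

-- ===== PORT A =====
-- Python sort keys are int for digit strings, str otherwise; mixed int/str comparison raises
-- TypeError in Python (excluded by Pre_); there pvLT returns false (unreachable under Pre_).
def pvLT : Sum Int String → Sum Int String → Bool
  | .inl a, .inl b => decide (a < b)
  | .inr a, .inr b => decide (a < b)
  | _, _ => false

-- key=lambda x: int(x) if x.isdigit() else x   (int(x) is some on isdigit strings, so getD 0 is exact)
def pvKeyA (x : String) : Sum Int String :=
  if PySem.Str.strIsdigit x then .inl ((PySem.Int.ofStr? x).getD 0) else .inr x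

def normalize_to_smart_sig (sig_str : String) : String :=
  if sig_str = "" then ""
  else
    -- sep "," is non-empty, so split? is always some: getD [] is exact
    let parts := (((PySem.Str.split? sig_str ",").getD []).map PySem.Str.strip).filter (fun x => x ≠ "")
    let pr := parts.foldl
      (fun (acc : List String × List String) pid =>
        if PySem.Str.startswith pid "2" then (acc.1, acc.2 ++ [pid]) else (acc.1 ++ [pid], acc.2))
      ([], [])
    -- specials.sort(key=…): PySem's stable sort engine (sorted_eq_foldl_insertBy) with A's key
    let specialsSorted := pr.2.foldl
      (fun acc x => PySem.List.insertBy (fun a b => pvLT (pvKeyA a) (pvKeyA b)) x acc) []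
    PySem.Str.join "," (pr.1 ++ specialsSorted)

-- ===== PORT B =====
-- key(p) = (1, int(p) if p.isdigit() else p) if p.startswith("2") else (0, 0)
def pvPartKey (p : String) : Int × Sum Int String :=
  if PySem.Str.startswith p "2" then
    (1, if PySem.Str.strIsdigit p then .inl ((PySem.Int.ofStr? p).getD 0) else .inr p)
  else (0, .inl 0)

-- Python tuple '<': lexicographic; second components only compared when first are equal
def pvTupLT (a b : Int × Sum Int String) : Bool :=
  if a.1 < b.1 then true else if b.1 < a.1 then false else pvLT a.2 b.2

def normalize_to_smart_sig_alt (sig_str : String) : String :=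
  if sig_str = "" then ""
  else
    let parts := (((PySem.Str.split? sig_str ",").getD []).map PySem.Str.strip).filter (fun x => x ≠ "")
    PySem.Str.join ","
      (parts.foldl (fun acc x => PySem.List.insertBy (fun a b => pvTupLT (pvPartKey a) (pvPartKey b)) x acc) [])

-- ===== PRECONDITION & SPEC =====
def pvParts (s : String) : List String :=
  (((PySem.Str.split? s ",").getD []).map PySem.Str.strip).filter (fun x => x ≠ "")

-- Pre_ excludes exactly the inputs on which Python A raises TypeError: cleaned parts starting
-- with "2" mixing digit and non-digit forms (the int-vs-str sort-key comparison); B raises there too.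
def Pre_normalize_to_smart_sig (sig_str : String) : Prop :=
  (∀ p ∈ (pvParts sig_str).filter (fun p => PySem.Str.startswith p "2"), PySem.Str.strIsdigit p = true) ∨
  (∀ p ∈ (pvParts sig_str).filter (fun p => PySem.Str.startswith p "2"), PySem.Str.strIsdigit p = false)
instance (sig_str : String) : Decidable (Pre_normalize_to_smart_sig sig_str) := by
  unfold Pre_normalize_to_smart_sig; infer_instance

def pvWitness_normalize_to_smart_sig : String := "3, 21 ,2,abc"

def Spec_normalize_to_smart_sig (sig_str : String) (out : String) : Prop := out = normalize_to_smart_sig_alt sig_str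
instance (sig_str : String) (out : String) : Decidable (Spec_normalize_to_smart_sig sig_str out) := by unfold Spec_normalize_to_smart_sig; infer_instance

-- ===== CLAIM (what is proved, stated in full; the proofs are below) =====
def Claim_equal_normalize_to_smart_sig : Prop := ∀ (sig_str : String), Dom_normalize_to_smart_sig sig_str → Pre_normalize_to_smart_sig sig_str → Spec_normalize_to_smart_sig sig_str (normalize_to_smart_sig sig_str)

-- ===== LEMMAS AND PROOFS =====
theorem pv_ins_skip (before : String → String → Bool) (x : String) (s0 s1 : List String)
    (h : ∀ z ∈ s0, before x z = false) :
    PySem.List.insertBy before x (s0 ++ s1) = s0 ++ PySem.List.insertBy before x s1 := by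
  induction s0 with
  | nil => simp
  | cons z s0 ih =>
    simp only [List.cons_append, PySem.List.insertBy, h z (by simp)]
    simp [ih fun w hw => h w (by simp [hw])]

theorem pv_ins_front (before : String → String → Bool) (x z : String) (s : List String)
    (h : before x z = true) :
    PySem.List.insertBy before x (z :: s) = x :: z :: s := by
  simp [PySem.List.insertBy, h]

theorem pv_ins_congr (before before' : String → String → Bool) (x : String) (s : List String)
    (h : ∀ z ∈ s, before x z = before' x z) :
    PySem.List.insertBy before x s = PySem.List.insertBy before' x s := by
  induction s with
  | nil => rfl
  | cons z s ih =>
    simp only [PySem.List.insertBy, h z (by simp)]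
    by_cases hz : before' x z = true <;>
      simp [hz, ih fun w hw => h w (by simp [hw])]

theorem pv_mem_isort (before : String → String → Bool) (l acc : List String) (x : String) :
    x ∈ l.foldl (fun acc y => PySem.List.insertBy before y acc) acc ↔ x ∈ l ∨ x ∈ acc := by
  induction l generalizing acc with
  | nil => simp
  | cons y l ih =>
    simp [List.foldl_cons, ih, PySem.List.mem_insertBy]
    tauto

theorem pv_partition (ps : List String) (a b : List String) :
    ps.foldl
      (fun (acc : List String × List String) pid =>
        if PySem.Str.startswith pid "2" then (acc.1, acc.2 ++ [pid]) else (acc.1 ++ [pid], acc.2))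
      (a, b)
    = (a ++ ps.filter (fun p => !(PySem.Str.startswith p "2")),
       b ++ ps.filter (fun p => PySem.Str.startswith p "2")) := by
  induction ps generalizing a b with
  | nil => simp
  | cons p ps ih =>
    rw [List.foldl_cons]
    cases hp : PySem.Str.startswith p "2" <;>
      simp only [hp, Bool.false_eq_true, if_true, if_false, ih, List.filter_cons,
        Bool.not_true, Bool.not_false] <;>
      simp

-- comparator facts
theorem pv_cmpB_str_str (x z : String) (hx : PySem.Str.startswith x "2" = false)
    (hz : PySem.Str.startswith z "2" = false) :
    pvTupLT (pvPartKey x) (pvPartKey z) = false := by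
  simp only [pvPartKey, hx, hz]
  simp [pvTupLT, pvLT]

theorem pv_cmpB_str_spec (x z : String) (hx : PySem.Str.startswith x "2" = false)
    (hz : PySem.Str.startswith z "2" = true) :
    pvTupLT (pvPartKey x) (pvPartKey z) = true := by
  simp only [pvPartKey, hx, hz]
  simp [pvTupLT]

theorem pv_cmpB_spec_str (x z : String) (hx : PySem.Str.startswith x "2" = true)
    (hz : PySem.Str.startswith z "2" = false) :
    pvTupLT (pvPartKey x) (pvPartKey z) = false := by
  simp only [pvPartKey, hx, hz]
  simp [pvTupLT]

theorem pv_cmpB_spec_spec (x z : String) (hx : PySem.Str.startswith x "2" = true)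
    (hz : PySem.Str.startswith z "2" = true) :
    pvTupLT (pvPartKey x) (pvPartKey z) = pvLT (pvKeyA x) (pvKeyA z) := by
  simp only [pvPartKey, pvKeyA, hx, hz]
  simp [pvTupLT]

-- the main invariant: one stable keyed insertion sort = strikers ++ sorted specials
theorem pv_main (ps : List String) :
    ps.foldl (fun acc x => PySem.List.insertBy (fun a b => pvTupLT (pvPartKey a) (pvPartKey b)) x acc) []
    = ps.filter (fun p => !(PySem.Str.startswith p "2"))
      ++ (ps.filter (fun p => PySem.Str.startswith p "2")).foldl
           (fun acc x => PySem.List.insertBy (fun a b => pvLT (pvKeyA a) (pvKeyA b)) x acc) [] := by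
  induction ps using List.reverseRecOn with
  | nil => simp
  | append_singleton ps p ih =>
    rw [List.foldl_append, List.foldl_cons, List.foldl_nil, ih, List.filter_append,
      List.filter_append]
    cases hp : PySem.Str.startswith p "2" with
    | true =>
      -- p is a special: it skips past the strikers, then is inserted with A's comparator
      rw [pv_ins_skip _ _ _ _ (fun z hz => pv_cmpB_spec_str p z hp
            (by simpa using (List.mem_filter.mp hz).2)),
        pv_ins_congr _ (fun a b => pvLT (pvKeyA a) (pvKeyA b)) _ _ (fun z hz => by
            rcases (pv_mem_isort _ _ _ z).mp hz with h | h
            · exact pv_cmpB_spec_spec p z hp (List.mem_filter.mp h).2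
            · simp at h)]
      have hf1 : List.filter (fun q => !(PySem.Str.startswith q "2")) [p] = [] := by
        simp only [List.filter_cons, List.filter_nil, hp]; simp
      have hf2 : List.filter (fun q => PySem.Str.startswith q "2") [p] = [p] := by
        simp only [List.filter_cons, List.filter_nil, hp]; simp
      rw [hf1, hf2, List.append_nil, List.foldl_append, List.foldl_cons, List.foldl_nil]
    | false =>
      -- p is a striker: it skips past the strikers and lands in front of all specials
      rw [pv_ins_skip _ _ _ _ (fun z hz => pv_cmpB_str_str p z hp
            (by simpa using (List.mem_filter.mp hz).2))]
      have hf1 : List.filter (fun q => !(PySem.Str.startswith q "2")) [p] = [p] := by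
        simp only [List.filter_cons, List.filter_nil, hp]; simp
      have hf2 : List.filter (fun q => PySem.Str.startswith q "2") [p] = [] := by
        simp only [List.filter_cons, List.filter_nil, hp]; simp
      rw [hf1, hf2, List.append_nil, List.append_assoc]
      rcases hs : (ps.filter (fun q => PySem.Str.startswith q "2")).foldl
          (fun acc x => PySem.List.insertBy (fun a b => pvLT (pvKeyA a) (pvKeyA b)) x acc) []
          with _ | ⟨z, t⟩
      · simp [PySem.List.insertBy]
      · have hz : PySem.Str.startswith z "2" = true := by
          rcases (pv_mem_isort _ _ _ z).mp (by rw [hs]; exact List.mem_cons_self ..) with h | h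
          · exact (List.mem_filter.mp h).2
          · simp at h
        rw [pv_ins_front _ _ _ _ (pv_cmpB_str_spec p z hp hz)]
        simp

-- ===== VERDICT (by name: the statement is the Claim_ definition above) =====
theorem normalize_to_smart_sig_spec : Claim_equal_normalize_to_smart_sig := by
  intro sig_str _ _
  unfold Spec_normalize_to_smart_sig normalize_to_smart_sig normalize_to_smart_sig_alt
  by_cases h : sig_str = ""
  · simp [h]
  · simp only [h, if_false]
    rw [pv_partition, pv_main]
    simp
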